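-- pv_equiv track=rewrite | github.com/Cpierswim/Algorithms | problem_solving_V.py | a_and_b_three_apart
-- ===== SOURCE A (Python) =====
-- def a_and_b_three_apart(string:str) -> bool:
--     '''Returns true if the characters 'a' and 'b' are found 3 characters apart
--
--     string -- The string to check
--     '''
--     string = string.lower()
--     for i in range(0, len(string) - 3):
--         look_for_char = None
--         if string[i] == 'a':
--             look_for_char = 'b'
--         elif string[i] == 'b':
--             look_for_char = 'a'
--         if string[i + 3] == look_for_char:
--             return True
--     return False
-- ===== SOURCE B (Python) =====
-- def a_and_b_three_apart(string: str) -> bool: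
--     '''Returns true if the characters 'a' and 'b' are found 3 characters apart
--
--     string -- The string to check
--     '''
--     s = string.lower()
--     a_pos = {i for i, c in enumerate(s) if c == 'a'}
--     b_pos = {i for i, c in enumerate(s) if c == 'b'}
--     return any(i + 3 in b_pos for i in a_pos) or any(i + 3 in a_pos for i in b_pos)
-- ===== Notes on version B (the rewrite author's own statement) =====
-- stated objective: alternative
-- what changed: Replaces A's single index loop comparing s[i] with s[i+3] by building the sets of positions of each of the two letters once and then testing whether any position shifted by 3 lands in the other letter's set.
import Mathlib
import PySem

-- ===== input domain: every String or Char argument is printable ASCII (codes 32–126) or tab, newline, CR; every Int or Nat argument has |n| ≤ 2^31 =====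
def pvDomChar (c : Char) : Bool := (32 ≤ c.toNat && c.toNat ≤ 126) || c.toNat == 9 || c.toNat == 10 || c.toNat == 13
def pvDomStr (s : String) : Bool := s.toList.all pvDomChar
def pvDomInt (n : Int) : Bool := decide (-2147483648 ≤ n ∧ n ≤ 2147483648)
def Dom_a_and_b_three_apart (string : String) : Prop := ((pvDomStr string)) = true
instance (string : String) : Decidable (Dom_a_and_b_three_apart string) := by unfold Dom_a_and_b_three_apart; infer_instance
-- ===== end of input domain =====

-- B replaces A's index loop by building the sets of 'a'- and 'b'-positions once and
-- intersect-checking shifted positions (objective: alternative; same cost, different strategy).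

-- ===== PORT A =====
-- for i in range(0, len(s) - 3): look_for_char = …; if s[i+3] == look_for_char: return True
def a_and_b_three_apart (string : String) : Bool :=
  let s := PySem.Chars.lower string.toList
  (PySem.List.pyRange 0 ((s.length : Int) - 3) 1).any (fun i =>
    let lookFor : Option Char :=
      if PySem.List.pyGet? s i = some 'a' then some 'b'
      else if PySem.List.pyGet? s i = some 'b' then some 'a'
      else none
    -- 's[i+3] == look_for_char' : comparison with None is False
    lookFor.isSome && (PySem.List.pyGet? s (i + 3) == lookFor))

-- ===== PORT B =====
def a_and_b_three_apart_alt (string : String) : Bool :=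
  let s := PySem.Chars.lower string.toList
  let aPos : PySem.Set Int :=
    PySem.Set.ofList ((PySem.List.enumerate s).filterMap
      (fun p => if p.2 = 'a' then some p.1 else none))
  let bPos : PySem.Set Int :=
    PySem.Set.ofList ((PySem.List.enumerate s).filterMap
      (fun p => if p.2 = 'b' then some p.1 else none))
  aPos.any (fun i => PySem.Set.contains bPos (i + 3)) ||
    bPos.any (fun i => PySem.Set.contains aPos (i + 3))

-- ===== PRECONDITION & SPEC =====
def Spec_a_and_b_three_apart (string : String) (out : Bool) : Prop := out = a_and_b_three_apart_alt string
instance (string : String) (out : Bool) : Decidable (Spec_a_and_b_three_apart string out) := by unfold Spec_a_and_b_three_apart; infer_instance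

-- ===== CLAIM (what is proved, stated in full; the proofs are below) =====
def Claim_equal_a_and_b_three_apart : Prop := ∀ (string : String), Dom_a_and_b_three_apart string → Spec_a_and_b_three_apart string (a_and_b_three_apart string)

-- ===== LEMMAS AND PROOFS =====

-- a 3-apart (lowercased) a/b pair exists
def pvHit (s : List Char) : Prop := ∃ k : Nat, k + 3 < s.length ∧
  ((s[k]? = some 'a' ∧ s[k + 3]? = some 'b') ∨ (s[k]? = some 'b' ∧ s[k + 3]? = some 'a'))

lemma mem_enumerate_iff (xs : List Char) (st : Int) (p : Int × Char) :
    p ∈ PySem.List.enumerate xs st ↔ ∃ k : Nat, k < xs.length ∧ p.1 = st + k ∧ xs[k]? = some p.2 := by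
  induction xs generalizing st with
  | nil => simp [PySem.List.enumerate_nil]
  | cons x xs ih =>
    rw [PySem.List.enumerate_cons, List.mem_cons]
    constructor
    · rintro (h | h)
      · exact ⟨0, by subst h; simp⟩
      · obtain ⟨k, hk, h1, h2⟩ := (ih (st + 1)).mp h
        exact ⟨k + 1, by simpa using hk, by omega, by simpa using h2⟩
    · rintro ⟨k, hk, h1, h2⟩
      cases k with
      | zero =>
        left; simp at h1 h2; obtain ⟨a, b⟩ := p; simp at h1 h2 ⊢; exact ⟨h1, h2.symm⟩
      | succ k =>
        right; refine (ih (st + 1)).mpr ⟨k, by simpa using hk, by omega, by simpa using h2⟩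

lemma a_iff (string : String) :
    a_and_b_three_apart string = true ↔ pvHit (PySem.Chars.lower string.toList) := by
  unfold a_and_b_three_apart pvHit
  set s := PySem.Chars.lower string.toList with hs
  rw [List.any_eq_true]
  constructor
  · rintro ⟨i, hmem, hcond⟩
    rw [PySem.List.mem_pyRange_one] at hmem
    obtain ⟨h0, hlt⟩ := hmem
    refine ⟨i.toNat, by omega, ?_⟩
    have hi : i = (i.toNat : Int) := by omega
    rw [hi] at hcond
    have h3 : (i.toNat : Int) + 3 = ((i.toNat + 3 : Nat) : Int) := by push_cast; ring
    rw [h3, PySem.List.pyGet?_natCast, PySem.List.pyGet?_natCast] at hcond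
    by_cases ha : s[i.toNat]? = some 'a'
    · simp [ha] at hcond; left; exact ⟨ha, hcond⟩
    · by_cases hb : s[i.toNat]? = some 'b'
      · simp [hb] at hcond; right; exact ⟨hb, hcond⟩
      · simp [ha, hb] at hcond
  · rintro ⟨k, hk, hpat⟩
    refine ⟨(k : Int), ?_, ?_⟩
    · rw [PySem.List.mem_pyRange_one]; omega
    · have h3 : (k : Int) + 3 = ((k + 3 : Nat) : Int) := by push_cast; ring
      rw [h3, PySem.List.pyGet?_natCast, PySem.List.pyGet?_natCast]
      rcases hpat with ⟨ha, hb⟩ | ⟨hb, ha⟩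
      · simp [ha, hb]
      · have hne : s[k]? ≠ some 'a' := by rw [hb]; decide
        rw [if_neg hne, if_pos hb]
        simp [ha]

lemma posList_mem (s : List Char) (c : Char) (i : Int) :
    i ∈ PySem.Set.ofList ((PySem.List.enumerate s).filterMap
        (fun p => if p.2 = c then some p.1 else none)) ↔
      ∃ k : Nat, k < s.length ∧ i = (k : Int) ∧ s[k]? = some c := by
  rw [PySem.Set.mem_ofList, List.mem_filterMap]
  constructor
  · rintro ⟨p, hp, hif⟩
    by_cases hc : p.2 = c
    · simp [hc] at hif
      obtain ⟨k, hk, h1, h2⟩ := (mem_enumerate_iff s 0 p).mp hp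
      exact ⟨k, hk, by omega, by rw [h2, hc]⟩
    · simp [hc] at hif
  · rintro ⟨k, hk, h1, h2⟩
    exact ⟨((k : Int), c), (mem_enumerate_iff s 0 _).mpr ⟨k, hk, by simp, h2⟩, by simp [h1]⟩

lemma b_iff (string : String) :
    a_and_b_three_apart_alt string = true ↔ pvHit (PySem.Chars.lower string.toList) := by
  unfold a_and_b_three_apart_alt pvHit
  set s := PySem.Chars.lower string.toList with hs
  rw [Bool.or_eq_true, List.any_eq_true, List.any_eq_true]
  constructor
  · rintro (⟨i, hmem, hc⟩ | ⟨i, hmem, hc⟩)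
    · obtain ⟨k, hk, hik, hka⟩ := (posList_mem s 'a' i).mp hmem
      simp only [PySem.Set.contains] at hc
      rw [List.contains_iff_mem, posList_mem s 'b' (i + 3)] at hc
      obtain ⟨m, hm, him, hmb⟩ := hc
      have : m = k + 3 := by omega
      exact ⟨k, by omega, Or.inl ⟨hka, this ▸ hmb⟩⟩
    · obtain ⟨k, hk, hik, hkb⟩ := (posList_mem s 'b' i).mp hmem
      simp only [PySem.Set.contains] at hc
      rw [List.contains_iff_mem, posList_mem s 'a' (i + 3)] at hc
      obtain ⟨m, hm, him, hma⟩ := hc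
      have : m = k + 3 := by omega
      exact ⟨k, by omega, Or.inr ⟨hkb, this ▸ hma⟩⟩
  · rintro ⟨k, hk, hpat⟩
    rcases hpat with ⟨ha, hb⟩ | ⟨hb, ha⟩
    · refine Or.inl ⟨(k : Int), (posList_mem s 'a' _).mpr ⟨k, by omega, rfl, ha⟩, ?_⟩
      simp only [PySem.Set.contains]
      rw [List.contains_iff_mem, posList_mem s 'b' _]
      exact ⟨k + 3, by omega, by push_cast; ring, hb⟩
    · refine Or.inr ⟨(k : Int), (posList_mem s 'b' _).mpr ⟨k, by omega, rfl, hb⟩, ?_⟩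
      simp only [PySem.Set.contains]
      rw [List.contains_iff_mem, posList_mem s 'a' _]
      exact ⟨k + 3, by omega, by push_cast; ring, ha⟩

-- ===== VERDICT (by name: the statement is the Claim_ definition above) =====
theorem a_and_b_three_apart_spec : Claim_equal_a_and_b_three_apart := by
  intro string _
  unfold Spec_a_and_b_three_apart
  have h := (a_iff string).trans (b_iff string).symm
  exact Bool.eq_iff_iff.mpr h
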